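-- pv_equiv track=rewrite | github.com/Precy2020/Python | random_assignments/gender_counter.py | students
-- ===== SOURCE A (Python) =====
-- def students(gender):
--
--     change = {'male': 0, 'female': 0}
--     for index in gender:
--         if index.casefold() == 'male':
--             change['male'] += 1
--
--         elif index.casefold() == 'female':
--             change['female'] += 1
--
--     return list(change.items())
-- ===== SOURCE B (Python) =====
-- def students(gender):
--     m = sum(1 for x in gender if x.casefold() == 'male')
--     f = sum(1 for x in gender if x.casefold() == 'female')
--     return [('male', m), ('female', f)]
-- ===== Notes on version B (the rewrite author's own statement) =====
-- stated objective: simpler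
-- what changed: Replaces the dict-accumulating interleaved loop with two independent filtered sums, returning the fixed-order pair list directly.
import Mathlib
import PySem

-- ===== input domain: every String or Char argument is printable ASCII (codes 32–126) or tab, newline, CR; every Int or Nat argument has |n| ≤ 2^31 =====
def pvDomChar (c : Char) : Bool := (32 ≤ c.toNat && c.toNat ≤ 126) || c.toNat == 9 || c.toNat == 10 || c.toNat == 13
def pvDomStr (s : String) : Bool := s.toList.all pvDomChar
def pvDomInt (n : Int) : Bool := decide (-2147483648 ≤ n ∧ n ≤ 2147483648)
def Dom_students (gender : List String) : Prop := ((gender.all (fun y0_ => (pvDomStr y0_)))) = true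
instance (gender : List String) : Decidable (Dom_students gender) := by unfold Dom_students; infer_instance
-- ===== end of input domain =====

-- B replaces A's interleaved dict-accumulating loop with two independent filtered counts (objective: simpler).


-- ===== PORT A =====
-- casefold is exact on the ASCII domain as PySem.Str.lower
def students (gender : List String) : List (String × Int) :=
  let change : PySem.Dict String Int := PySem.Dict.ofList [("male", 0), ("female", 0)]
  let change := gender.foldl (fun d index =>
    if PySem.Str.lower index == "male" then d.modify "male" 0 (· + 1)
    else if PySem.Str.lower index == "female" then d.modify "female" 0 (· + 1)
    else d) change
  change.items

-- ===== PORT B =====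
def students_alt (gender : List String) : List (String × Int) :=
  let m : Int := ((gender.filter (fun x => PySem.Str.lower x == "male")).length : Int)
  let f : Int := ((gender.filter (fun x => PySem.Str.lower x == "female")).length : Int)
  [("male", m), ("female", f)]

-- ===== PRECONDITION & SPEC =====
def Spec_students (gender : List String) (out : List (String × Int)) : Prop := out = students_alt gender
instance (gender : List String) (out : List (String × Int)) : Decidable (Spec_students gender out) := by unfold Spec_students; infer_instance

-- ===== CLAIM (what is proved, stated in full; the proofs are below) =====
def Claim_equal_students : Prop := ∀ (gender : List String), Dom_students gender → Spec_students gender (students gender)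

-- ===== LEMMAS AND PROOFS =====
theorem modify_male (m f : Int) : (PySem.Dict.mk [("male", m), ("female", f)]).modify "male" 0 (· + 1) =
    PySem.Dict.mk [("male", m + 1), ("female", f)] := by
  simp [PySem.Dict.modify, PySem.Dict.insert, PySem.Dict.getD, PySem.Dict.get?]

theorem modify_female (m f : Int) : (PySem.Dict.mk [("male", m), ("female", f)]).modify "female" 0 (· + 1) =
    PySem.Dict.mk [("male", m), ("female", f + 1)] := by
  simp [PySem.Dict.modify, PySem.Dict.insert, PySem.Dict.getD, PySem.Dict.get?]

theorem students_loop (gender : List String) (m f : Int) :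
    (gender.foldl (fun d index =>
        if PySem.Str.lower index == "male" then d.modify "male" 0 (· + 1)
        else if PySem.Str.lower index == "female" then d.modify "female" 0 (· + 1)
        else d) (PySem.Dict.mk [("male", m), ("female", f)])).items =
      [("male", m + ((gender.filter (fun x => PySem.Str.lower x == "male")).length : Int)),
       ("female", f + ((gender.filter (fun x => PySem.Str.lower x == "female")).length : Int))] := by
  induction gender generalizing m f with
  | nil => simp
  | cons x xs ih =>
    simp only [List.foldl_cons, List.filter_cons]
    by_cases h : PySem.Str.lower x == "male"
    · have hne : (PySem.Str.lower x == "female") = false := by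
        have hx := beq_iff_eq.mp h; simp [hx]
      rw [if_pos h, modify_male, ih]
      simp [h, hne]
      ring
    · by_cases h2 : PySem.Str.lower x == "female"
      · rw [if_neg (by simp [h]), if_pos h2, modify_female, ih]
        simp [h, h2]
        ring
      · rw [if_neg (by simp [h]), if_neg (by simp [h2]), ih]
        simp [h, h2]

theorem students_spec : Claim_equal_students := by
  intro gender _
  unfold Spec_students students students_alt
  simpa [PySem.Dict.ofList] using students_loop gender 0 0
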